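-- pv_equiv track=rewrite | github.com/linda840103/MAT | CIFAR10/basics.py | findFromArea3D
-- ===== SOURCE A (Python) =====
-- def findFromArea3D(image,manipulated,avoid,nimage,ps,numDimsToMani,ks):
--     topImage = {}
--     toBeDeleted = []
--     for i in range(len(image)):
--         for j in range(len(image[0])):
--             for k in range(len(image[0][0])):
--                 if len(topImage) < numDimsToMani and ((j,k) in ps or len(ps) == 0) and (i,j,k) not in ks:
--                     topImage[(i,j,k)] = nimage[i][j][k]
--                 elif ((j,k) in ps or len(ps) == 0) and (i,j,k) not in ks:
--                     bl = False
--                     for (k1,k2,k3), v in topImage.items():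
--                         if v < nimage[i][j][k] and not ((k1,k2,k3) in toBeDeleted) and ((not avoid) or ((i,j,k) not in manipulated)):
--                             toBeDeleted.append((k1,k2,k3))
--                             bl = True
--                             break
--                     if bl == True:
--                         topImage[(i,j,k)] = nimage[i][j][k]
--     for (k1,k2,k3) in toBeDeleted:
--         del topImage[(k1,k2,k3)]
--     return topImage.keys()
-- ===== SOURCE B (Python) =====
-- # B: precompute the eligible stream, then keep the pool in a segment tree over
-- # insertion positions (leftmost alive value < v found by descending cached
-- # subtree minima) instead of A's linear rescans of a tombstone dict.
--
-- def _mn(a, b):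
--     if a is None:
--         return b
--     if b is None:
--         return a
--     return a if a <= b else b
--
--
-- def _build(n):
--     if n <= 1:
--         return ('L', None)
--     h = n // 2
--     return ('N', None, _build(h), _build(n - h))
--
--
-- def _update(t, n, pos, val):
--     if t[0] == 'L':
--         return ('L', val)
--     h = n // 2
--     if pos < h:
--         l, r = _update(t[2], h, pos, val), t[3]
--     else:
--         l, r = t[2], _update(t[3], n - h, pos - h, val)
--     return ('N', _mn(l[1], r[1]), l, r)
--
--
-- def _query_lt(t, n, v):
--     # leftmost position holding an alive value < v, or None
--     if t[1] is None or t[1] >= v: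
--         return None
--     if t[0] == 'L':
--         return 0
--     h = n // 2
--     lv = t[2][1]
--     if lv is not None and lv < v:
--         return _query_lt(t[2], h, v)
--     return h + _query_lt(t[3], n - h, v)
--
--
-- def _leaves(t):
--     if t[0] == 'L':
--         return [t[1]]
--     return _leaves(t[2]) + _leaves(t[3])
--
--
-- def findFromArea3D(image, manipulated, avoid, nimage, ps, numDimsToMani, ks):
--     if numDimsToMani <= 0:
--         return []
--     ps_set = set(ps)
--     ks_set = set(ks)
--     man_set = set(manipulated)
--     ni = len(image)
--     nj = len(image[0]) if ni else 0
--     nk = len(image[0][0]) if nj else 0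
--     stream = []
--     for i in range(ni):
--         for j in range(nj):
--             for k in range(nk):
--                 if (not ps_set or (j, k) in ps_set) and (i, j, k) not in ks_set:
--                     stream.append(((i, j, k), nimage[i][j][k],
--                                    avoid and (i, j, k) in man_set))
--     m = len(stream)
--     tree = _build(m)
--     keys = []
--     count = 0
--     for key, v, blocked in stream:
--         if count < numDimsToMani:
--             tree = _update(tree, m, count, v)
--             keys.append(key)
--             count += 1
--         elif not blocked:
--             q = _query_lt(tree, m, v)
--             if q is not None:
--                 tree = _update(tree, m, q, None)
--                 tree = _update(tree, m, count, v)
--                 keys.append(key)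
--                 count += 1
--     leaves = _leaves(tree)
--     return [keys[p] for p in range(count) if leaves[p] is not None]
-- ===== Notes on version B (the rewrite author's own statement) =====
-- stated objective: faster
-- what changed: B first extracts the eligible-pixel stream, then replaces A's linear rescan of an ever-growing tombstone dict by a segment tree over insertion positions whose cached subtree minima locate the leftmost alive entry with value < v in O(log n) (evict = clear leaf, insert = set next leaf).
import Mathlib
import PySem

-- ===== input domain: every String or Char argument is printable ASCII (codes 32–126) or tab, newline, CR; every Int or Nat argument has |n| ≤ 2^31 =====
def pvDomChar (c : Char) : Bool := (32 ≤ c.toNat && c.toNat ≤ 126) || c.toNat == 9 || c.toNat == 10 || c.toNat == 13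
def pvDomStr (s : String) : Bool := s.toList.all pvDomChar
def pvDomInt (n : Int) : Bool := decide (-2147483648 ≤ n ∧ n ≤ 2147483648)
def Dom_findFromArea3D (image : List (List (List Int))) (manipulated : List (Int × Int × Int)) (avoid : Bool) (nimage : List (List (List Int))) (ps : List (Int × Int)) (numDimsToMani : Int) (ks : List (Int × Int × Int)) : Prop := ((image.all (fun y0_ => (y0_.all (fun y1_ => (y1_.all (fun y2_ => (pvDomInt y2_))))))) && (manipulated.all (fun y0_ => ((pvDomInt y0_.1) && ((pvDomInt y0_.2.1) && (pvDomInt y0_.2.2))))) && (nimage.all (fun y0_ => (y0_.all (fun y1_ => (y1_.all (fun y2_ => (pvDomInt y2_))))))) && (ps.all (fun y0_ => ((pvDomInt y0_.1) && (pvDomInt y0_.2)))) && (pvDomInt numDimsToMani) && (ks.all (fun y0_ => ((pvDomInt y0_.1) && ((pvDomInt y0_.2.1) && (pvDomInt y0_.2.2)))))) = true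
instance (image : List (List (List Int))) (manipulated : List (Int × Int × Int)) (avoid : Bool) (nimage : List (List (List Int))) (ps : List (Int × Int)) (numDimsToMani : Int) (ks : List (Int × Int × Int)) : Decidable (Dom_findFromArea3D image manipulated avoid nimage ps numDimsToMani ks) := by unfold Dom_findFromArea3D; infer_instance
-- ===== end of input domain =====

-- B precomputes the eligible-pixel stream and replaces A's linear rescans of an
-- ever-growing tombstone dict by a segment tree over insertion positions
-- (cached subtree minima find the leftmost alive value < v); measured faster.

-- ===== PORT A =====
-- loop body of A's triple loop, as a helper (one step per pixel (i,j,k))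
def pvAStep (manipulated : List (Int × Int × Int)) (avoid : Bool) (nimage : List (List (List Int))) (ps : List (Int × Int)) (numDimsToMani : Int) (ks : List (Int × Int × Int)) (st : PySem.Dict (Int × Int × Int) Int × List (Int × Int × Int)) (t : Int × Int × Int) : PySem.Dict (Int × Int × Int) Int × List (Int × Int × Int) :=
  let top := st.1
  let tbd := st.2
  let i := t.1; let j := t.2.1; let k := t.2.2
  let nv := PySem.List.pyGetD (PySem.List.pyGetD (PySem.List.pyGetD nimage i []) j []) k 0
  if decide ((PySem.Dict.size top : Int) < numDimsToMani) && ((ps.contains (j, k) || ps.isEmpty) && !(ks.contains (i, j, k))) then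
    (top.insert (i, j, k) nv, tbd)
  else if (ps.contains (j, k) || ps.isEmpty) && !(ks.contains (i, j, k)) then
    match top.items.find? (fun kv => decide (kv.2 < nv) && !(tbd.contains kv.1) && (!avoid || !(manipulated.contains (i, j, k)))) with
    | some kv => (top.insert (i, j, k) nv, tbd ++ [kv.1])
    | none => (top, tbd)
  else (top, tbd)

def findFromArea3D (image : List (List (List Int))) (manipulated : List (Int × Int × Int)) (avoid : Bool) (nimage : List (List (List Int))) (ps : List (Int × Int)) (numDimsToMani : Int) (ks : List (Int × Int × Int)) : List (Int × Int × Int) :=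
  let st0 : PySem.Dict (Int × Int × Int) Int × List (Int × Int × Int) := (PySem.Dict.empty, [])
  let fin := (PySem.List.pyRange 0 (PySem.List.len image) 1).foldl (fun st i =>
    (PySem.List.pyRange 0 (PySem.List.len (PySem.List.pyGetD image 0 [])) 1).foldl (fun st j =>
      (PySem.List.pyRange 0 (PySem.List.len (PySem.List.pyGetD (PySem.List.pyGetD image 0 []) 0 [])) 1).foldl (fun st k =>
        pvAStep manipulated avoid nimage ps numDimsToMani ks st (i, j, k)) st) st) st0
  (fin.2.foldl (fun d key => PySem.Dict.erase d key) fin.1).keys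

-- ===== PORT B =====
-- functional segment tree over insertion positions (Source B's tuple trees)
inductive PvSeg : Type
  | leaf : Option Int → PvSeg
  | node : Option Int → PvSeg → PvSeg → PvSeg
deriving DecidableEq, Repr

-- min of two optional values, None = empty (Source B's _mn)
def pvMn (a b : Option Int) : Option Int :=
  match a, b with
  | none, b => b
  | a, none => a
  | some x, some y => if x ≤ y then some x else some y

def PvSeg.val : PvSeg → Option Int
  | .leaf v => v
  | .node v _ _ => v

-- Source B's _build (structural fuel = n, enough since subtree sizes halve)
def pvBuildAux : Nat → Nat → PvSeg
  | 0, _ => .leaf none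
  | fuel + 1, n =>
    if n ≤ 1 then .leaf none
    else .node none (pvBuildAux fuel (n / 2)) (pvBuildAux fuel (n - n / 2))

def pvBuild (n : Nat) : PvSeg := pvBuildAux n n

-- Source B's _update (persistent)
def pvUpdate : PvSeg → Nat → Nat → Option Int → PvSeg
  | .leaf _, _, _, val => .leaf val
  | .node _ l r, n, pos, val =>
    let h := n / 2
    if pos < h then
      let l' := pvUpdate l h pos val
      .node (pvMn l'.val r.val) l' r
    else
      let r' := pvUpdate r (n - h) (pos - h) val
      .node (pvMn l.val r'.val) l r'

-- "alive value < v" test on an optional leaf value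
def pvLtv (o : Option Int) (v : Int) : Bool :=
  match o with
  | none => false
  | some u => decide (u < v)

-- Source B's _query_lt (under the tree invariant the right branch never misses,
-- where Python would raise TypeError on None we map over the Option)
def pvQueryLt : PvSeg → Nat → Int → Option Nat
  | .leaf w, _, v => if pvLtv w v then some 0 else none
  | .node mn l r, n, v =>
    if !(pvLtv mn v) then none
    else
      let h := n / 2
      if pvLtv l.val v then pvQueryLt l h v
      else (pvQueryLt r (n - h) v).map (fun q => h + q)

-- Source B's _leaves
def PvSeg.leaves : PvSeg → List (Option Int)
  | .leaf v => [v]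
  | .node _ l r => l.leaves ++ r.leaves

-- Source B's main loop body (state: tree, keys in insertion order, insertion count)
def pvBStep (numDimsToMani : Int) (m : Nat) (st : PvSeg × List (Int × Int × Int) × Nat) (item : (Int × Int × Int) × Int × Bool) : PvSeg × List (Int × Int × Int) × Nat :=
  if (st.2.2 : Int) < numDimsToMani then
    (pvUpdate st.1 m st.2.2 (some item.2.1), st.2.1 ++ [item.1], st.2.2 + 1)
  else if !item.2.2 then
    match pvQueryLt st.1 m item.2.1 with
    | some q => (pvUpdate (pvUpdate st.1 m q none) m st.2.2 (some item.2.1), st.2.1 ++ [item.1], st.2.2 + 1)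
    | none => st
  else st

def findFromArea3D_alt (image : List (List (List Int))) (manipulated : List (Int × Int × Int)) (avoid : Bool) (nimage : List (List (List Int))) (ps : List (Int × Int)) (numDimsToMani : Int) (ks : List (Int × Int × Int)) : List (Int × Int × Int) :=
  if numDimsToMani ≤ 0 then []
  else
    let psS := PySem.Set.ofList ps
    let ksS := PySem.Set.ofList ks
    let manS := PySem.Set.ofList manipulated
    let ni := PySem.List.len image
    let nj := if ni ≠ 0 then PySem.List.len (PySem.List.pyGetD image 0 []) else 0
    let nk := if nj ≠ 0 then PySem.List.len (PySem.List.pyGetD (PySem.List.pyGetD image 0 []) 0 []) else 0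
    let stream : List ((Int × Int × Int) × Int × Bool) :=
      (PySem.List.pyRange 0 ni 1).foldl (fun acc i =>
        (PySem.List.pyRange 0 nj 1).foldl (fun acc j =>
          (PySem.List.pyRange 0 nk 1).foldl (fun acc k =>
            if (psS.isEmpty || PySem.Set.contains psS (j, k)) && !(PySem.Set.contains ksS (i, j, k)) then
              acc ++ [((i, j, k), PySem.List.pyGetD (PySem.List.pyGetD (PySem.List.pyGetD nimage i []) j []) k 0, avoid && PySem.Set.contains manS (i, j, k))]
            else acc) acc) acc) []
    let m := stream.length
    let fin := stream.foldl (pvBStep numDimsToMani m) (pvBuild m, ([] : List (Int × Int × Int)), 0)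
    let leaves := fin.1.leaves
    ((List.range fin.2.2).filter (fun p => (leaves.getD p none).isSome)).map (fun p => fin.2.1.getD p (0, 0, 0))

-- ===== PRECONDITION & SPEC =====
-- Pre_ excludes exactly the inputs on which Python A raises IndexError: when
-- numDimsToMani > 0, every eligible pixel (i,j,k) of image's iteration shape
-- must be an in-range index of nimage (A reads nimage[i][j][k] there).
def Pre_findFromArea3D (image : List (List (List Int))) (manipulated : List (Int × Int × Int)) (avoid : Bool) (nimage : List (List (List Int))) (ps : List (Int × Int)) (numDimsToMani : Int) (ks : List (Int × Int × Int)) : Prop :=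
  numDimsToMani ≤ 0 ∨
    (∀ i ∈ List.range image.length, ∀ j ∈ List.range (image.headD []).length,
      ∀ k ∈ List.range ((image.headD []).headD []).length,
        (((j : Int), (k : Int)) ∈ ps ∨ ps = []) → ((i : Int), (j : Int), (k : Int)) ∉ ks →
          i < nimage.length ∧ j < (nimage.getD i []).length ∧ k < ((nimage.getD i []).getD j []).length)
instance (image : List (List (List Int))) (manipulated : List (Int × Int × Int)) (avoid : Bool) (nimage : List (List (List Int))) (ps : List (Int × Int)) (numDimsToMani : Int) (ks : List (Int × Int × Int)) : Decidable (Pre_findFromArea3D image manipulated avoid nimage ps numDimsToMani ks) := by unfold Pre_findFromArea3D; infer_instance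

def pvWitness_findFromArea3D : List (List (List Int)) × (List (Int × Int × Int)) × Bool × List (List (List Int)) × (List (Int × Int)) × Int × (List (Int × Int × Int)) :=
  ([[[1, 2], [3, 4]]], [], false, [[[5, 6], [7, 8]]], [], 2, [])

def Spec_findFromArea3D (image : List (List (List Int))) (manipulated : List (Int × Int × Int)) (avoid : Bool) (nimage : List (List (List Int))) (ps : List (Int × Int)) (numDimsToMani : Int) (ks : List (Int × Int × Int)) (out : List (Int × Int × Int)) : Prop := out = findFromArea3D_alt image manipulated avoid nimage ps numDimsToMani ks
instance (image : List (List (List Int))) (manipulated : List (Int × Int × Int)) (avoid : Bool) (nimage : List (List (List Int))) (ps : List (Int × Int)) (numDimsToMani : Int) (ks : List (Int × Int × Int)) (out : List (Int × Int × Int)) : Decidable (Spec_findFromArea3D image manipulated avoid nimage ps numDimsToMani ks out) := by unfold Spec_findFromArea3D; infer_instance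

-- ===== CLAIM (what is proved, stated in full; the proofs are below) =====
def Claim_equal_findFromArea3D : Prop := ∀ (image : List (List (List Int))) (manipulated : List (Int × Int × Int)) (avoid : Bool) (nimage : List (List (List Int))) (ps : List (Int × Int)) (numDimsToMani : Int) (ks : List (Int × Int × Int)), Dom_findFromArea3D image manipulated avoid nimage ps numDimsToMani ks → Pre_findFromArea3D image manipulated avoid nimage ps numDimsToMani ks → Spec_findFromArea3D image manipulated avoid nimage ps numDimsToMani ks (findFromArea3D image manipulated avoid nimage ps numDimsToMani ks)

-- ===== LEMMAS AND PROOFS =====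

-- ---- proof-side vocabulary: eligibility, pixel value, pixel list, item stream ----
def pvElig (ps : List (Int × Int)) (ks : List (Int × Int × Int)) (t : Int × Int × Int) : Bool :=
  (ps.contains (t.2.1, t.2.2) || ps.isEmpty) && !(ks.contains t)

def pvVal (nimage : List (List (List Int))) (t : Int × Int × Int) : Int :=
  PySem.List.pyGetD (PySem.List.pyGetD (PySem.List.pyGetD nimage t.1 []) t.2.1 []) t.2.2 0

def pvPix (a b c : Int) : List (Int × Int × Int) :=
  (PySem.List.pyRange 0 a 1).flatMap (fun i =>
    (PySem.List.pyRange 0 b 1).flatMap (fun j =>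
      (PySem.List.pyRange 0 c 1).map (fun k => (i, j, k))))

def pvStream (manipulated : List (Int × Int × Int)) (avoid : Bool) (nimage : List (List (List Int))) (ps : List (Int × Int)) (ks : List (Int × Int × Int)) (a b c : Int) : List ((Int × Int × Int) × Int × Bool) :=
  ((pvPix a b c).filter (pvElig ps ks)).map (fun t => (t, pvVal nimage t, avoid && manipulated.contains t))

-- A's per-item step (on an eligible item: key, value, blocked flag)
def pvStepA (cap : Int) (st : PySem.Dict (Int × Int × Int) Int × List (Int × Int × Int)) (item : (Int × Int × Int) × Int × Bool) : PySem.Dict (Int × Int × Int) Int × List (Int × Int × Int) :=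
  if decide ((PySem.Dict.size st.1 : Int) < cap) then (st.1.insert item.1 item.2.1, st.2)
  else
    match st.1.items.find? (fun kv => decide (kv.2 < item.2.1) && !(st.2.contains kv.1) && !item.2.2) with
    | some kv => (st.1.insert item.1 item.2.1, st.2 ++ [kv.1])
    | none => st

-- the reference model both ports are measured against: live entries in
-- insertion order plus the total number of insertions
def pvStepM (cap : Int) (st : List ((Int × Int × Int) × Int) × Nat) (item : (Int × Int × Int) × Int × Bool) : List ((Int × Int × Int) × Int) × Nat :=
  if (st.2 : Int) < cap then (st.1 ++ [(item.1, item.2.1)], st.2 + 1)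
  else if !item.2.2 then
    match st.1.findIdx? (fun e => decide (e.2 < item.2.1)) with
    | some idx => (st.1.eraseIdx idx ++ [(item.1, item.2.1)], st.2 + 1)
    | none => st
  else st

-- tree shape + cached-minimum invariant for B's segment tree
def SegWF : PvSeg → Nat → Prop
  | .leaf _, n => n = 1
  | .node mn l r, n => 2 ≤ n ∧ SegWF l (n / 2) ∧ SegWF r (n - n / 2) ∧ mn = pvMn l.val r.val

-- the live entries encoded by B's keys list and the tree's leaves
def pvZip : List (Int × Int × Int) → List (Option Int) → List ((Int × Int × Int) × Int)
  | [], _ => []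
  | _ :: _, [] => []
  | k :: ks, some u :: os => (k, u) :: pvZip ks os
  | _ :: ks, none :: os => pvZip ks os

def pvInvA (sa : PySem.Dict (Int × Int × Int) Int × List (Int × Int × Int)) (sm : List ((Int × Int × Int) × Int) × Nat) : Prop :=
  sm.2 = sa.1.items.length ∧
  sm.1 = sa.1.items.filter (fun kv => !(sa.2.contains kv.1)) ∧
  (∀ x ∈ sa.2, x ∈ sa.1.keys) ∧
  sa.1.keys.Nodup

def pvInvB (m : Nat) (sb : PvSeg × List (Int × Int × Int) × Nat) (sm : List ((Int × Int × Int) × Int) × Nat) : Prop :=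
  SegWF sb.1 (max m 1) ∧ sb.2.2 = sm.2 ∧ sb.2.1.length = sm.2 ∧
  (∀ p, sm.2 ≤ p → sb.1.leaves.getD p none = none) ∧
  sm.1 = pvZip sb.2.1 sb.1.leaves

-- ---- generic list facts specialised to the two programs ----
lemma pv_find?_and_filter {α : Type} (l : List α) (a b : α → Bool) :
    l.find? (fun x => a x && b x) = (l.filter b).find? a := by
  induction l with
  | nil => rfl
  | cons x xs ih =>
    by_cases hb : b x = true
    · by_cases ha : a x = true
      · simp [List.find?, List.filter, ha, hb]
      · simp only [Bool.not_eq_true] at ha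
        simp [List.find?, List.filter, ha, hb, ih]
    · simp only [Bool.not_eq_true] at hb
      simp [List.find?, List.filter, hb, ih]

lemma pv_find?_erase {κ ν : Type} [BEq κ] [LawfulBEq κ] (l : List (κ × ν)) (p : κ × ν → Bool) (e : κ × ν)
    (hnd : (l.map Prod.fst).Nodup) (hf : l.find? p = some e) :
    ∃ idx, l.findIdx? p = some idx ∧ l.filter (fun kv => !(kv.1 == e.1)) = l.eraseIdx idx := by
  induction l with
  | nil => simp at hf
  | cons x xs ih =>
    simp only [List.map_cons, List.nodup_cons] at hnd
    by_cases hp : p x = true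
    · refine ⟨0, by simp [List.findIdx?_cons, hp], ?_⟩
      rw [List.find?_cons_of_pos hp] at hf
      injection hf with he; subst he
      have hall : ∀ kv ∈ xs, (!(kv.1 == x.1)) = true := by
        intro kv hmem
        have : kv.1 ∈ xs.map Prod.fst := List.mem_map_of_mem hmem
        have hne : kv.1 ≠ x.1 := fun h => hnd.1 (h ▸ this)
        simp [hne]
      simp [List.filter_eq_self.2 hall]
    · simp only [Bool.not_eq_true] at hp
      rw [List.find?_cons_of_neg (by simp [hp])] at hf
      obtain ⟨idx, hidx, hfil⟩ := ih hnd.2 hf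
      refine ⟨idx + 1, by simp [List.findIdx?_cons, hp, hidx], ?_⟩
      have hex : e ∈ xs := List.mem_of_find?_eq_some hf
      have : e.1 ∈ xs.map Prod.fst := List.mem_map_of_mem hex
      have hne : x.1 ≠ e.1 := fun h => hnd.1 (h ▸ this)
      simp only [List.eraseIdx_cons_succ, List.filter_cons]
      simp [hne, hfil]

lemma pv_getD_set_ne (l : List (Option Int)) (i j : Nat) (v : Option Int) (h : i ≠ j) :
    (l.set i v).getD j none = l.getD j none := by
  simp [List.getD_eq_getElem?_getD, h]

-- ---- A (dict + tombstones) simulates the model ----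
lemma pv_stepAM (cap : Int) (sa : PySem.Dict (Int × Int × Int) Int × List (Int × Int × Int))
    (sm : List ((Int × Int × Int) × Int) × Nat) (item : (Int × Int × Int) × Int × Bool)
    (hInv : pvInvA sa sm) (hfresh : item.1 ∉ sa.1.keys) :
    pvInvA (pvStepA cap sa item) (pvStepM cap sm item) ∧
    ∀ x ∈ (pvStepA cap sa item).1.keys, x ∈ sa.1.keys ∨ x = item.1 := by
  obtain ⟨h1, h2, h3, h4⟩ := hInv
  obtain ⟨key, v, blocked⟩ := item
  simp only at hfresh ⊢
  have hct : sa.1.contains key = false := by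
    cases h : sa.1.contains key with
    | false => rfl
    | true => exact absurd ((PySem.Dict.contains_iff_mem_keys sa.1 key).mp h) hfresh
  have htbd : key ∉ sa.2 := fun hm => hfresh (h3 key hm)
  have htbdc : sa.2.contains key = false := by
    cases h : sa.2.contains key with
    | false => rfl
    | true => exact absurd (List.contains_iff_mem.mp h) htbd
  have hitems : (sa.1.insert key v).items = sa.1.items ++ [(key, v)] :=
    PySem.Dict.items_insert_of_not_contains _ _ hct
  have hkeysnew : (sa.1.insert key v).keys = sa.1.keys ++ [key] := by
    simp [PySem.Dict.keys, hitems]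
  have hsize : (PySem.Dict.size sa.1 : Int) = (sa.1.items.length : Int) := rfl
  by_cases hlt : ((sa.1.items.length : Int) < cap)
  · -- phase 1: plain insertion
    have hb : pvStepA cap sa (key, v, blocked) = (sa.1.insert key v, sa.2) := by
      simp only [pvStepA, hsize]
      rw [if_pos (by simpa using hlt)]
    have hm : pvStepM cap sm (key, v, blocked) = (sm.1 ++ [(key, v)], sm.2 + 1) := by
      simp only [pvStepM]
      rw [if_pos (by rw [h1]; exact_mod_cast hlt)]
    rw [hb, hm]
    refine ⟨⟨?_, ?_, ?_, ?_⟩, ?_⟩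
    · simp [h1, hitems]
    · simp only [hitems, List.filter_append, h2, List.filter_cons, htbdc,
        Bool.not_false, List.filter_nil, if_true]
    · intro x hx; rw [hkeysnew]; exact List.mem_append_left _ (h3 x hx)
    · rw [hkeysnew]
      refine List.Nodup.append h4 (List.nodup_singleton _) ?_
      intro x hx hx2
      simp only [List.mem_singleton] at hx2
      exact hfresh (hx2 ▸ hx)
    · intro x hx
      rw [hkeysnew] at hx
      rcases List.mem_append.mp hx with hx | hx
      · exact Or.inl hx
      · simp only [List.mem_singleton] at hx; exact Or.inr hx
  · -- phase 2
    have hsz : (decide ((PySem.Dict.size sa.1 : Int) < cap)) = false := by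
      rw [hsize]; simpa using hlt
    have hszm : ¬ ((sm.2 : Int) < cap) := by rw [h1]; exact_mod_cast hlt
    cases blocked with
    | true =>
      have hfind : sa.1.items.find?
          (fun kv => decide (kv.2 < v) && !(sa.2.contains kv.1) && !(true : Bool)) = none := by
        rw [List.find?_eq_none]
        intro kv _
        simp
      have hb : pvStepA cap sa (key, v, true) = sa := by
        simp only [pvStepA, hsz]
        rw [if_neg (by simp)]
        rw [hfind]
      have hm : pvStepM cap sm (key, v, true) = sm := by
        simp only [pvStepM]
        rw [if_neg hszm]
        rfl
      rw [hb, hm]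
      exact ⟨⟨h1, h2, h3, h4⟩, fun x hx => Or.inl hx⟩
    | false =>
      have hpred : (fun kv : (Int × Int × Int) × Int => decide (kv.2 < v) && !(sa.2.contains kv.1) && !(false : Bool))
          = (fun kv : (Int × Int × Int) × Int => decide (kv.2 < v) && !(sa.2.contains kv.1)) := by
        funext kv
        simp
      have hfind : sa.1.items.find? (fun kv => decide (kv.2 < v) && !(sa.2.contains kv.1) && !(false : Bool))
          = sm.1.find? (fun kv => decide (kv.2 < v)) := by
        rw [hpred, pv_find?_and_filter, ← h2]
      cases hf : sm.1.find? (fun kv => decide (kv.2 < v)) with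
      | none =>
        have hidx : sm.1.findIdx? (fun e => decide (e.2 < v)) = none :=
          List.findIdx?_eq_none_iff.mpr (by
            intro x hx
            have := List.find?_eq_none.mp hf x hx
            simpa using this)
        have hb : pvStepA cap sa (key, v, false) = sa := by
          simp only [pvStepA, hsz]
          rw [if_neg (by simp), hfind, hf]
        have hm : pvStepM cap sm (key, v, false) = sm := by
          simp only [pvStepM]
          rw [if_neg hszm]
          simp only [Bool.not_false, if_pos]
          rw [hidx]
        rw [hb, hm]
        exact ⟨⟨h1, h2, h3, h4⟩, fun x hx => Or.inl hx⟩
      | some e =>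
        have hnd2 : (sm.1.map Prod.fst).Nodup := by
          rw [h2]
          have hsub : ((sa.1.items.filter (fun kv => !(sa.2.contains kv.1))).map Prod.fst).Sublist (sa.1.items.map Prod.fst) :=
            List.Sublist.map Prod.fst List.filter_sublist
          exact hsub.nodup h4
        obtain ⟨idx, hidx, hfil⟩ := pv_find?_erase sm.1 _ e hnd2 hf
        have hb : pvStepA cap sa (key, v, false) = (sa.1.insert key v, sa.2 ++ [e.1]) := by
          simp only [pvStepA, hsz]
          rw [if_neg (by simp), hfind, hf]
        have hm : pvStepM cap sm (key, v, false) = (sm.1.eraseIdx idx ++ [(key, v)], sm.2 + 1) := by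
          simp only [pvStepM]
          rw [if_neg hszm]
          simp only [Bool.not_false, if_pos]
          rw [hidx]
        rw [hb, hm]
        -- facts about the replaced entry
        have hemem : e ∈ sm.1 := List.mem_of_find?_eq_some hf
        have hemem2 : e ∈ sa.1.items := by
          rw [h2] at hemem; exact List.mem_of_mem_filter hemem
        have he1keys : e.1 ∈ sa.1.keys := List.mem_map_of_mem hemem2
        have hne : key ≠ e.1 := fun h => hfresh (h ▸ he1keys)
        have hte1 : (key == e.1) = false := by simp [hne]
        have htbdc2 : ((sa.2 ++ [e.1]).contains key) = false := by
          cases h : (sa.2 ++ [e.1]).contains key with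
          | false => rfl
          | true =>
            rcases List.mem_append.mp (List.contains_iff_mem.mp h) with hmem | hmem
            · exact absurd hmem htbd
            · exact absurd (List.mem_singleton.mp hmem) hne
        refine ⟨⟨?_, ?_, ?_, ?_⟩, ?_⟩
        · simp [h1, hitems]
        · rw [hitems, List.filter_append]
          have hsing : [(key, v)].filter (fun kv => !((sa.2 ++ [e.1]).contains kv.1)) = [(key, v)] := by
            simp only [List.filter_cons, htbdc2, Bool.not_false, if_true, List.filter_nil]
          rw [hsing]
          have hmain : sa.1.items.filter (fun kv => !((sa.2 ++ [e.1]).contains kv.1))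
              = sm.1.eraseIdx idx := by
            rw [← hfil, h2, List.filter_filter]
            apply List.filter_congr
            intro kv _
            simp only [List.contains_append]
            cases hA : kv.1 == e.1 <;> cases hB : sa.2.contains kv.1 <;>
              simp_all
          rw [hmain]
        · intro x hx
          rw [hkeysnew]
          rcases List.mem_append.mp hx with hx | hx
          · exact List.mem_append_left _ (h3 x hx)
          · simp only [List.mem_singleton] at hx
            subst hx
            exact List.mem_append_left _ he1keys
        · rw [hkeysnew]
          refine List.Nodup.append h4 (List.nodup_singleton _) ?_
          intro x hx hx2
          simp only [List.mem_singleton] at hx2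
          exact hfresh (hx2 ▸ hx)
        · intro x hx
          rw [hkeysnew] at hx
          rcases List.mem_append.mp hx with hx | hx
          · exact Or.inl hx
          · simp only [List.mem_singleton] at hx; exact Or.inr hx

lemma pv_foldAM (cap : Int) (l : List ((Int × Int × Int) × Int × Bool)) (hnd : (l.map (·.1)).Nodup) :
    ∀ sa sm, pvInvA sa sm → (∀ x ∈ sa.1.keys, x ∉ l.map (·.1)) →
    pvInvA (l.foldl (pvStepA cap) sa) (l.foldl (pvStepM cap) sm) := by
  induction l with
  | nil => intro sa sm h _; exact h
  | cons x xs ih =>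
    intro sa sm hInv hfresh
    simp only [List.map_cons, List.nodup_cons] at hnd
    obtain ⟨hstep, hkeys⟩ := pv_stepAM cap sa sm x hInv
      (fun h => hfresh x.1 h (by simp))
    simp only [List.foldl_cons]
    refine ih hnd.2 _ _ hstep ?_
    intro y hy
    rcases hkeys y hy with h | h
    · intro hmem
      obtain ⟨z, hz, hzy⟩ := List.mem_map.1 hmem
      exact hfresh y h (by simp only [List.map_cons, List.mem_cons]; right; exact List.mem_map.2 ⟨z, hz, hzy⟩)
    · subst h; exact fun hmem => hnd.1 (by simpa using hmem)

lemma pv_erase_fold (tbd : List (Int × Int × Int)) :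
    ∀ top : PySem.Dict (Int × Int × Int) Int,
    (tbd.foldl (fun d key => PySem.Dict.erase d key) top).items
      = top.items.filter (fun kv => !(tbd.contains kv.1)) := by
  induction tbd with
  | nil => intro top; simp
  | cons x xs ih =>
    intro top
    rw [List.foldl_cons, ih]
    have herase : (PySem.Dict.erase top x).items = top.items.filter (fun p => !(p.1 == x)) := rfl
    rw [herase, List.filter_filter]
    apply List.filter_congr
    intro kv _
    simp only [List.contains_cons]
    cases h : kv.1 == x <;> cases h2 : xs.contains kv.1 <;> simp_all

-- ---- segment-tree correctness ----
lemma pv_ltv_mn (a b : Option Int) (v : Int) : pvLtv (pvMn a b) v = (pvLtv a v || pvLtv b v) := by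
  cases a with
  | none => cases b <;> simp [pvMn, pvLtv]
  | some x =>
    cases b with
    | none => simp [pvMn, pvLtv]
    | some y =>
      simp only [pvMn, pvLtv]
      split_ifs with h <;> simp <;> omega

lemma pv_leaves_length (t : PvSeg) : ∀ n, SegWF t n → t.leaves.length = n := by
  induction t with
  | leaf v => intro n h; simpa [PvSeg.leaves] using h.symm
  | node mn l r ihl ihr =>
    intro n h
    obtain ⟨h2, hl, hr, _⟩ := h
    simp [PvSeg.leaves, ihl _ hl, ihr _ hr]
    omega

lemma pv_val_any (t : PvSeg) : ∀ n, SegWF t n → ∀ v, pvLtv t.val v = t.leaves.any (fun o => pvLtv o v) := by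
  induction t with
  | leaf w => intro n _ v; simp [PvSeg.leaves, PvSeg.val]
  | node mn l r ihl ihr =>
    intro n h v
    obtain ⟨h2, hl, hr, hmn⟩ := h
    rw [show (PvSeg.node mn l r).val = mn from rfl, hmn, pv_ltv_mn,
      ihl _ hl v, ihr _ hr v]
    rw [show ∀ a, (PvSeg.node a l r).leaves = l.leaves ++ r.leaves from fun _ => rfl,
      List.any_append]

lemma pv_build_aux_wf (fuel : Nat) : ∀ n, n ≤ fuel + 1 →
    SegWF (pvBuildAux fuel n) (max n 1) ∧ (pvBuildAux fuel n).leaves = List.replicate (max n 1) none ∧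
    (pvBuildAux fuel n).val = none := by
  induction fuel with
  | zero =>
    intro n hn
    interval_cases n <;> exact ⟨rfl, rfl, rfl⟩
  | succ fuel ih =>
    intro n hn
    by_cases h1 : n ≤ 1
    · have hb : pvBuildAux (fuel + 1) n = .leaf none := by simp [pvBuildAux, h1]
      rw [hb]
      have : max n 1 = 1 := by omega
      rw [this]
      exact ⟨rfl, rfl, rfl⟩
    · have hb : pvBuildAux (fuel + 1) n
          = .node none (pvBuildAux fuel (n / 2)) (pvBuildAux fuel (n - n / 2)) := by
        simp [pvBuildAux, h1]
      obtain ⟨hwl, hll, hvl⟩ := ih (n / 2) (by omega)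
      obtain ⟨hwr, hlr, hvr⟩ := ih (n - n / 2) (by omega)
      have hm1 : max (n / 2) 1 = n / 2 := by omega
      have hm2 : max (n - n / 2) 1 = n - n / 2 := by omega
      have hm : max n 1 = n := by omega
      rw [hm1] at hwl hll; rw [hm2] at hwr hlr
      rw [hb, hm]
      refine ⟨⟨by omega, hwl, hwr, by rw [hvl, hvr]; rfl⟩, ?_, rfl⟩
      simp only [PvSeg.leaves, hll, hlr, ← List.replicate_add]
      congr 1
      omega

lemma pv_build_wf (n : Nat) : SegWF (pvBuild n) (max n 1) ∧ (pvBuild n).leaves = List.replicate (max n 1) none := by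
  obtain ⟨h1, h2, _⟩ := pv_build_aux_wf n n (by omega)
  exact ⟨h1, h2⟩

lemma pv_update_wf (t : PvSeg) : ∀ n pos val, SegWF t n → pos < n →
    SegWF (pvUpdate t n pos val) n ∧ (pvUpdate t n pos val).leaves = t.leaves.set pos val := by
  induction t with
  | leaf w =>
    intro n pos val hwf hpos
    have hn : n = 1 := hwf
    subst hn
    have hp : pos = 0 := by omega
    subst hp
    exact ⟨rfl, rfl⟩
  | node mn l r ihl ihr =>
    intro n pos val hwf hpos
    obtain ⟨h2, hl, hr, hmn⟩ := hwf
    have hlen : l.leaves.length = n / 2 := pv_leaves_length l _ hl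
    by_cases hcase : pos < n / 2
    · have hu : pvUpdate (.node mn l r) n pos val
          = .node (pvMn (pvUpdate l (n / 2) pos val).val r.val) (pvUpdate l (n / 2) pos val) r := by
        simp [pvUpdate, hcase]
      obtain ⟨hwl', hleav⟩ := ihl (n / 2) pos val hl hcase
      rw [hu]
      constructor
      · exact ⟨h2, hwl', hr, rfl⟩
      · simp only [PvSeg.leaves, hleav, List.set_append, hlen, hcase, if_pos]
    · have hu : pvUpdate (.node mn l r) n pos val
          = .node (pvMn l.val (pvUpdate r (n - n / 2) (pos - n / 2) val).val) l (pvUpdate r (n - n / 2) (pos - n / 2) val) := by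
        simp [pvUpdate, hcase]
      obtain ⟨hwr', hleav⟩ := ihr (n - n / 2) (pos - n / 2) val hr (by omega)
      rw [hu]
      constructor
      · exact ⟨h2, hl, hwr', rfl⟩
      · simp only [PvSeg.leaves, hleav, List.set_append, hlen]
        rw [if_neg (by omega)]

lemma pv_query_eq (t : PvSeg) : ∀ n v, SegWF t n →
    pvQueryLt t n v = t.leaves.findIdx? (fun o => pvLtv o v) := by
  induction t with
  | leaf w =>
    intro n v _
    simp only [pvQueryLt, PvSeg.leaves, List.findIdx?_cons, List.findIdx?_nil]
    cases h : pvLtv w v <;> simp_all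
  | node mn l r ihl ihr =>
    intro n v hwf
    obtain ⟨h2, hl, hr, hmn⟩ := hwf
    have hlen : l.leaves.length = n / 2 := pv_leaves_length l _ hl
    have hany : pvLtv mn v = ((l.leaves ++ r.leaves).any (fun o => pvLtv o v)) := by
      rw [show mn = (PvSeg.node mn l r).val from rfl,
        pv_val_any (PvSeg.node mn l r) n (by exact ⟨h2, hl, hr, hmn⟩) v]
      rfl
    simp only [pvQueryLt, PvSeg.leaves]
    cases hmv : pvLtv mn v with
    | false =>
      rw [hmv] at hany
      have : ∀ o ∈ l.leaves ++ r.leaves, pvLtv o v = false := by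
        intro o ho
        by_contra hne
        simp only [Bool.not_eq_false] at hne
        have : (l.leaves ++ r.leaves).any (fun o => pvLtv o v) = true :=
          List.any_eq_true.2 ⟨o, ho, hne⟩
        rw [← hany] at this; exact absurd this (by simp)
      simp [List.findIdx?_eq_none_iff.2 this]
    | true =>
      simp only [Bool.not_true, Bool.false_eq_true, if_false, List.findIdx?_append]
      cases hlv : pvLtv l.val v with
      | true =>
        rw [if_pos rfl, ihl _ v hl]
        have : l.leaves.any (fun o => pvLtv o v) = true := by
          rw [← pv_val_any l _ hl v]; exact hlv
        obtain ⟨o, ho, hov⟩ := List.any_eq_true.1 this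
        have : l.leaves.findIdx? (fun o => pvLtv o v) ≠ none := by
          intro hnone
          exact absurd hov (by simp [List.findIdx?_eq_none_iff.1 hnone o ho])
        obtain ⟨q, hq⟩ := Option.ne_none_iff_exists'.1 this
        simp [hq]
      | false =>
        rw [if_neg (by simp), ihr _ v hr]
        have hnone : l.leaves.findIdx? (fun o => pvLtv o v) = none := by
          rw [List.findIdx?_eq_none_iff]
          intro o ho
          by_contra hne
          simp only [Bool.not_eq_false] at hne
          have : l.leaves.any (fun o => pvLtv o v) = true := List.any_eq_true.2 ⟨o, ho, hne⟩
          rw [← pv_val_any l _ hl v] at this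
          rw [hlv] at this; exact absurd this (by simp)
        rw [hnone, Option.none_or]
        rw [hlen]
        cases hrq : r.leaves.findIdx? (fun o => pvLtv o v) <;> simp [Nat.add_comm]

-- ---- pvZip bookkeeping ----
lemma pv_zip_append_set (keys : List (Int × Int × Int)) :
    ∀ (leaves : List (Option Int)) (key : Int × Int × Int) (v : Int), keys.length < leaves.length →
    pvZip (keys ++ [key]) (leaves.set keys.length (some v)) = pvZip keys leaves ++ [(key, v)] := by
  induction keys with
  | nil =>
    intro leaves key v hlen
    cases leaves with
    | nil => simp at hlen
    | cons o os => simp [pvZip]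
  | cons k ks ih =>
    intro leaves key v hlen
    cases leaves with
    | nil => simp at hlen
    | cons o os =>
      have hlen2 : ks.length < os.length := by simpa using hlen
      cases o with
      | some u => simpa [pvZip] using ih os key v hlen2
      | none => simpa [pvZip] using ih os key v hlen2

lemma pv_zip_find (keys : List (Int × Int × Int)) :
    ∀ (leaves : List (Option Int)) (v : Int),
    (∀ p, keys.length ≤ p → leaves.getD p none = none) →
    (leaves.findIdx? (fun o => pvLtv o v) = none ∧
      (pvZip keys leaves).findIdx? (fun e => decide (e.2 < v)) = none) ∨
    (∃ q idx, leaves.findIdx? (fun o => pvLtv o v) = some q ∧ q < keys.length ∧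
      (pvZip keys leaves).findIdx? (fun e => decide (e.2 < v)) = some idx ∧
      pvZip keys (leaves.set q none) = (pvZip keys leaves).eraseIdx idx) := by
  induction keys with
  | nil =>
    intro leaves v htr
    left
    constructor
    · rw [List.findIdx?_eq_none_iff]
      intro o ho
      obtain ⟨p, hp, hpo⟩ := List.mem_iff_getElem.1 ho
      have hnone : leaves.getD p none = none := htr p (Nat.zero_le p)
      rw [List.getD_eq_getElem?_getD, List.getElem?_eq_getElem hp] at hnone
      simp only [Option.getD_some] at hnone
      rw [hpo] at hnone; subst hnone; rfl
    · simp [pvZip]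
  | cons k ks ih =>
    intro leaves v htr
    cases leaves with
    | nil =>
      left
      exact ⟨rfl, by simp [pvZip]⟩
    | cons o os =>
      have htr2 : ∀ p, ks.length ≤ p → os.getD p none = none := by
        intro p hp
        have := htr (p + 1) (by simpa using hp)
        simpa using this
      cases o with
      | none =>
        have hhead : pvLtv none v = false := rfl
        rcases ih os v htr2 with ⟨hn1, hn2⟩ | ⟨q, idx, hq, hqlt, hidx, herase⟩
        · left
          constructor
          · simp [List.findIdx?_cons, hhead, hn1]
          · simpa [pvZip] using hn2
        · right
          refine ⟨q + 1, idx, ?_, by simp only [List.length_cons]; omega, ?_, ?_⟩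
          · simp [List.findIdx?_cons, hhead, hq]
          · simpa [pvZip] using hidx
          · simpa [pvZip, List.set_cons_succ] using herase
      | some u =>
        by_cases hu : u < v
        · right
          refine ⟨0, 0, ?_, by simp, ?_, ?_⟩
          · simp [List.findIdx?_cons, pvLtv, hu]
          · simp [pvZip, List.findIdx?_cons, hu]
          · simp [pvZip]
        · have hhead : pvLtv (some u) v = false := by simp [pvLtv]; omega
          rcases ih os v htr2 with ⟨hn1, hn2⟩ | ⟨q, idx, hq, hqlt, hidx, herase⟩
          · left
            constructor
            · simp [List.findIdx?_cons, hhead, hn1]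
            · simp [pvZip, List.findIdx?_cons, hu, hn2]
          · right
            refine ⟨q + 1, idx + 1, ?_, by simp only [List.length_cons]; omega, ?_, ?_⟩
            · simp [List.findIdx?_cons, hhead, hq]
            · simp [pvZip, List.findIdx?_cons, hu, hidx]
            · simp [pvZip, List.set_cons_succ, List.eraseIdx_cons_succ, herase]

lemma pv_zip_out (d : Int × Int × Int) (keys : List (Int × Int × Int)) :
    ∀ (leaves : List (Option Int)),
    ((List.range keys.length).filter (fun p => (leaves.getD p none).isSome)).map (fun p => keys.getD p d)
      = (pvZip keys leaves).map Prod.fst := by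
  induction keys with
  | nil => intro leaves; simp [pvZip]
  | cons k ks ih =>
    intro leaves
    cases leaves with
    | nil =>
      have hnone : ∀ p : Nat, (([] : List (Option Int)).getD p none).isSome = false := by
        intro p; simp
      simp [pvZip]
    | cons o os =>
      rw [List.length_cons, List.range_succ_eq_map, List.filter_cons]
      have htail : List.filter (fun p => ((o :: os).getD p none).isSome) (List.map Nat.succ (List.range ks.length))
          = List.map Nat.succ (List.filter (fun p => (os.getD p none).isSome) (List.range ks.length)) := by
        rw [List.filter_map]
        rfl
      rw [htail]
      have hmapmap : List.map (fun p => (k :: ks).getD p d) (List.map Nat.succ (List.filter (fun p => (os.getD p none).isSome) (List.range ks.length)))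
          = List.map (fun p => ks.getD p d) (List.filter (fun p => (os.getD p none).isSome) (List.range ks.length)) := by
        rw [List.map_map]
        rfl
      cases o with
      | some u =>
        rw [if_pos (by rfl)]
        rw [List.map_cons, hmapmap, ih os]
        rfl
      | none =>
        rw [if_neg (by simp)]
        rw [hmapmap, ih os]
        rfl

-- ---- B (segment tree) simulates the model ----
lemma pv_stepBM (cap : Int) (m : Nat) (sb : PvSeg × List (Int × Int × Int) × Nat)
    (sm : List ((Int × Int × Int) × Int) × Nat) (item : (Int × Int × Int) × Int × Bool)
    (hInv : pvInvB m sb sm) (hroom : sm.2 < m) :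
    pvInvB m (pvBStep cap m sb item) (pvStepM cap sm item) ∧
    (pvStepM cap sm item).2 ≤ sm.2 + 1 := by
  obtain ⟨hwf, hc, hk, htr, halive⟩ := hInv
  have hmax : max m 1 = m := by omega
  rw [hmax] at hwf
  have hlen : sb.1.leaves.length = m := pv_leaves_length sb.1 m hwf
  obtain ⟨key, v, blocked⟩ := item
  by_cases h1 : (sm.2 : Int) < cap
  · -- phase 1: plain insertion at position count
    have hb : pvBStep cap m sb (key, v, blocked)
        = (pvUpdate sb.1 m sb.2.2 (some v), sb.2.1 ++ [key], sb.2.2 + 1) := by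
      simp only [pvBStep, hc]
      rw [if_pos h1]
    have hm : pvStepM cap sm (key, v, blocked) = (sm.1 ++ [(key, v)], sm.2 + 1) := by
      simp only [pvStepM]
      rw [if_pos h1]
    obtain ⟨hwf', hleav⟩ := pv_update_wf sb.1 m sm.2 (some v) hwf hroom
    rw [hb, hm, hc]
    refine ⟨⟨by rw [hmax]; exact hwf', rfl, by simp [hk], ?_, ?_⟩, by simp⟩
    · intro p hp
      simp only [hleav]
      rw [pv_getD_set_ne _ _ _ _ (by omega)]
      exact htr p (by omega)
    · rw [hleav, ← hk, pv_zip_append_set _ _ _ _ (by rw [hlen]; omega), halive]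
  · -- capacity reached
    cases blocked with
    | true =>
      have hb : pvBStep cap m sb (key, v, true) = sb := by
        simp only [pvBStep, hc]
        rw [if_neg h1]
        rfl
      have hm : pvStepM cap sm (key, v, true) = sm := by
        simp only [pvStepM]
        rw [if_neg h1]
        rfl
      rw [hb, hm]
      exact ⟨⟨by rw [hmax]; exact hwf, hc, hk, htr, halive⟩, by omega⟩
    | false =>
      have hquery : pvQueryLt sb.1 m v = sb.1.leaves.findIdx? (fun o => pvLtv o v) :=
        pv_query_eq sb.1 m v hwf
      have htr2 : ∀ p, sb.2.1.length ≤ p → sb.1.leaves.getD p none = none := by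
        intro p hp
        exact htr p (by omega)
      rcases pv_zip_find sb.2.1 sb.1.leaves v htr2 with ⟨hn1, hn2⟩ | ⟨q, idx, hq, hqlt, hidx, herase⟩
      · have hb : pvBStep cap m sb (key, v, false) = sb := by
          simp only [pvBStep, hc]
          rw [if_neg h1]
          simp only [Bool.not_false, if_pos]
          rw [hquery, hn1]
        have hm : pvStepM cap sm (key, v, false) = sm := by
          simp only [pvStepM]
          rw [if_neg h1]
          simp only [Bool.not_false, if_pos]
          rw [halive, hn2]
        rw [hb, hm]
        exact ⟨⟨by rw [hmax]; exact hwf, hc, hk, htr, halive⟩, by omega⟩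
      · have hqm : q < m := by omega
        obtain ⟨hwf1, hleav1⟩ := pv_update_wf sb.1 m q none hwf hqm
        obtain ⟨hwf2, hleav2⟩ :=
          pv_update_wf (pvUpdate sb.1 m q none) m sm.2 (some v) hwf1 hroom
        have hb : pvBStep cap m sb (key, v, false)
            = (pvUpdate (pvUpdate sb.1 m q none) m sb.2.2 (some v), sb.2.1 ++ [key], sb.2.2 + 1) := by
          simp only [pvBStep, hc]
          rw [if_neg h1]
          simp only [Bool.not_false, if_pos]
          rw [hquery, hq]
        have hm : pvStepM cap sm (key, v, false)
            = (sm.1.eraseIdx idx ++ [(key, v)], sm.2 + 1) := by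
          simp only [pvStepM]
          rw [if_neg h1]
          simp only [Bool.not_false, if_pos]
          rw [halive, hidx]
        rw [hb, hm, hc]
        refine ⟨⟨by rw [hmax]; exact hwf2, rfl, by simp [hk], ?_, ?_⟩, by simp⟩
        · intro p hp
          simp only [hleav2, hleav1]
          rw [pv_getD_set_ne _ _ _ _ (by omega), pv_getD_set_ne _ _ _ _ (by omega)]
          exact htr p (by omega)
        · rw [hleav2, hleav1, ← hk,
            pv_zip_append_set _ _ _ _ (by rw [List.length_set, hlen]; omega),
            herase, halive]

lemma pv_foldBM (cap : Int) (m : Nat) (l : List ((Int × Int × Int) × Int × Bool)) :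
    ∀ sb sm, pvInvB m sb sm → sm.2 + l.length ≤ m →
    pvInvB m (l.foldl (pvBStep cap m) sb) (l.foldl (pvStepM cap) sm) := by
  induction l with
  | nil => intro sb sm h _; exact h
  | cons x xs ih =>
    intro sb sm hInv hbudget
    have hroom : sm.2 < m := by
      have := hbudget
      simp only [List.length_cons] at this
      omega
    obtain ⟨hstep, hcnt⟩ := pv_stepBM cap m sb sm x hInv hroom
    simp only [List.foldl_cons]
    refine ih _ _ hstep ?_
    simp only [List.length_cons] at hbudget
    omega

-- ---- reshaping the two ports onto the stream ----
lemma pv_contains_ofList {α : Type} [BEq α] [LawfulBEq α] (xs : List α) (x : α) :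
    PySem.Set.contains (PySem.Set.ofList xs) x = xs.contains x := by
  rw [Bool.eq_iff_iff]
  simp [PySem.Set.mem_ofList]

lemma pv_isEmpty_ofList {α : Type} [BEq α] [LawfulBEq α] (xs : List α) :
    (PySem.Set.ofList xs : List α).isEmpty = xs.isEmpty := by
  cases xs with
  | nil => rfl
  | cons a l => simp [PySem.Set.ofList_cons]

lemma pv_astep_eq (manipulated : List (Int × Int × Int)) (avoid : Bool) (nimage : List (List (List Int))) (ps : List (Int × Int)) (cap : Int) (ks : List (Int × Int × Int)) (st : PySem.Dict (Int × Int × Int) Int × List (Int × Int × Int)) (t : Int × Int × Int) :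
    pvAStep manipulated avoid nimage ps cap ks st t
      = if pvElig ps ks t then pvStepA cap st (t, pvVal nimage t, avoid && manipulated.contains t) else st := by
  simp only [pvAStep, pvStepA, pvElig, pvVal]
  cases helig : (ps.contains (t.2.1, t.2.2) || ps.isEmpty) && !(ks.contains t) with
  | false => simp
  | true =>
    by_cases hsz : ((PySem.Dict.size st.1 : Int) < cap)
    · simp [hsz]
    · simp only [hsz, decide_false, Bool.false_and]
      simp
      rfl

lemma pv_tripleA (manipulated : List (Int × Int × Int)) (avoid : Bool) (nimage : List (List (List Int))) (ps : List (Int × Int)) (cap : Int) (ks : List (Int × Int × Int)) (a b c : Int) (st0 : PySem.Dict (Int × Int × Int) Int × List (Int × Int × Int)) :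
    (PySem.List.pyRange 0 a 1).foldl (fun st i =>
      (PySem.List.pyRange 0 b 1).foldl (fun st j =>
        (PySem.List.pyRange 0 c 1).foldl (fun st k =>
          pvAStep manipulated avoid nimage ps cap ks st (i, j, k)) st) st) st0
    = (pvStream manipulated avoid nimage ps ks a b c).foldl (pvStepA cap) st0 := by
  have h1 : (pvStream manipulated avoid nimage ps ks a b c).foldl (pvStepA cap) st0
      = ((pvPix a b c).filter (pvElig ps ks)).foldl
          (fun st t => pvStepA cap st (t, pvVal nimage t, avoid && manipulated.contains t)) st0 := by
    rw [pvStream, List.foldl_map]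
  have h2 : ((pvPix a b c).filter (pvElig ps ks)).foldl
        (fun st t => pvStepA cap st (t, pvVal nimage t, avoid && manipulated.contains t)) st0
      = (pvPix a b c).foldl
          (fun st t => if pvElig ps ks t then pvStepA cap st (t, pvVal nimage t, avoid && manipulated.contains t) else st) st0 :=
    (PySem.List.foldl_if_eq_foldl_filter _ _ _ _).symm
  have h3 : (pvPix a b c).foldl
        (fun st t => if pvElig ps ks t then pvStepA cap st (t, pvVal nimage t, avoid && manipulated.contains t) else st) st0
      = (pvPix a b c).foldl (pvAStep manipulated avoid nimage ps cap ks) st0 := by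
    apply PySem.List.foldl_congr_mem
    intro acc x _
    exact (pv_astep_eq manipulated avoid nimage ps cap ks acc x).symm
  rw [h1, h2, h3]
  simp only [pvPix, List.foldl_flatMap, List.foldl_map]

lemma pv_streamB (manipulated : List (Int × Int × Int)) (avoid : Bool) (nimage : List (List (List Int))) (ps : List (Int × Int)) (ks : List (Int × Int × Int)) (a b c : Int) :
    ((PySem.List.pyRange 0 a 1).foldl (fun acc i =>
      (PySem.List.pyRange 0 b 1).foldl (fun acc j =>
        (PySem.List.pyRange 0 c 1).foldl (fun acc k =>
          if ((PySem.Set.ofList ps : PySem.Set (Int × Int)).isEmpty || PySem.Set.contains (PySem.Set.ofList ps) (j, k)) && !(PySem.Set.contains (PySem.Set.ofList ks) (i, j, k)) then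
            acc ++ [((i, j, k), PySem.List.pyGetD (PySem.List.pyGetD (PySem.List.pyGetD nimage i []) j []) k 0, avoid && PySem.Set.contains (PySem.Set.ofList manipulated) (i, j, k))]
          else acc) acc) acc) ([] : List ((Int × Int × Int) × Int × Bool)))
    = pvStream manipulated avoid nimage ps ks a b c := by
  have hflatcongr : ∀ {α β : Type} (l : List α) (f g : α → List β), (∀ x, f x = g x) → l.flatMap f = l.flatMap g := by
    intro α β l f g h
    rw [funext h]
  simp only [PySem.List.foldl_append_if, PySem.List.foldl_append_eq_flatMap, List.nil_append]
  rw [pvStream, pvPix]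
  simp only [List.filter_flatMap, List.map_flatMap, List.filter_map, List.map_map]
  apply hflatcongr
  intro i
  apply hflatcongr
  intro j
  have hfil : (fun k : Int => ((PySem.Set.ofList ps : PySem.Set (Int × Int)).isEmpty || PySem.Set.contains (PySem.Set.ofList ps) (j, k)) && !(PySem.Set.contains (PySem.Set.ofList ks) (i, j, k)))
      = ((pvElig ps ks) ∘ (fun k => (i, j, k))) := by
    funext k
    simp only [Function.comp, pvElig, pv_contains_ofList, pv_isEmpty_ofList]
    rw [Bool.or_comm]
  rw [hfil]
  refine List.map_congr_left ?_
  intro k hk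
  simp only [Function.comp, pvVal, pv_contains_ofList]

lemma pv_pix_nodup (a b c : Int) : (pvPix a b c).Nodup := by
  rw [pvPix, List.nodup_flatMap]
  constructor
  · intro i _
    rw [List.nodup_flatMap]
    constructor
    · intro j _
      refine List.Nodup.map ?_ (PySem.List.nodup_pyRange_one 0 c)
      intro x y hxy
      simpa using congrArg (fun t => t.2.2) hxy
    · refine List.Pairwise.imp ?_ (PySem.List.pairwise_lt_pyRange_one 0 b)
      intro j1 j2 hlt x hx1 hx2
      simp only [List.mem_map] at hx1 hx2
      obtain ⟨k1, _, rfl⟩ := hx1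
      obtain ⟨k2, _, h2⟩ := hx2
      have : j2 = j1 := congrArg (fun t => t.2.1) h2
      omega
  · refine List.Pairwise.imp ?_ (PySem.List.pairwise_lt_pyRange_one 0 a)
    intro i1 i2 hlt x hx1 hx2
    simp only [List.mem_flatMap, List.mem_map] at hx1 hx2
    obtain ⟨j1, _, k1, _, rfl⟩ := hx1
    obtain ⟨j2, _, k2, _, h2⟩ := hx2
    have : i2 = i1 := congrArg (fun t => t.1) h2
    omega

lemma pv_stream_keys (manipulated : List (Int × Int × Int)) (avoid : Bool) (nimage : List (List (List Int))) (ps : List (Int × Int)) (ks : List (Int × Int × Int)) (a b c : Int) :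
    (pvStream manipulated avoid nimage ps ks a b c).map (·.1) = (pvPix a b c).filter (pvElig ps ks) := by
  simp [pvStream, List.map_map, Function.comp_def]

lemma pv_foldM_zero (cap : Int) (hcap : cap ≤ 0) (l : List ((Int × Int × Int) × Int × Bool)) :
    l.foldl (pvStepM cap) ([], 0) = ([], 0) := by
  induction l with
  | nil => rfl
  | cons x xs ih =>
    have hstep : pvStepM cap ([], 0) x = ([], 0) := by
      simp only [pvStepM]
      rw [if_neg (by push_cast; omega)]
      cases x.2.2 <;> simp [List.findIdx?_nil]
    simpa [hstep] using ih

-- ===== VERDICT (by name: the statement is the Claim_ definition above) =====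
theorem findFromArea3D_spec : Claim_equal_findFromArea3D := by
  intro image manipulated avoid nimage ps cap ks _ _
  unfold Spec_findFromArea3D
  -- shared vocabulary
  set a := PySem.List.len image with ha
  set b := PySem.List.len (PySem.List.pyGetD image 0 []) with hb
  set c := PySem.List.len (PySem.List.pyGetD (PySem.List.pyGetD image 0 []) 0 []) with hc
  set S := pvStream manipulated avoid nimage ps ks a b c with hS
  set sm := S.foldl (pvStepM cap) ([], 0) with hsm
  -- the A side equals the model's live entries
  have hndS : (S.map (·.1)).Nodup := by
    rw [hS, pv_stream_keys]
    exact (pv_pix_nodup a b c).filter _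
  have hInvA : pvInvA (S.foldl (pvStepA cap) (PySem.Dict.empty, [])) sm := by
    refine pv_foldAM cap S hndS (PySem.Dict.empty, []) ([], 0)
      ⟨rfl, rfl, by intro x hx; simp at hx, PySem.Dict.nodup_keys_empty⟩ ?_
    intro x hx
    simp [PySem.Dict.keys, PySem.Dict.empty] at hx
  have hA : findFromArea3D image manipulated avoid nimage ps cap ks = sm.1.map Prod.fst := by
    simp only [findFromArea3D]
    rw [pv_tripleA manipulated avoid nimage ps cap ks a b c (PySem.Dict.empty, [])]
    set F := S.foldl (pvStepA cap) (PySem.Dict.empty, []) with hF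
    show (F.2.foldl (fun d key => PySem.Dict.erase d key) F.1).items.map (·.1) = sm.1.map Prod.fst
    rw [pv_erase_fold, ← hInvA.2.1]
  by_cases hcap : cap ≤ 0
  · -- the pool capacity is non-positive: both sides return []
    rw [hA, hsm, pv_foldM_zero cap hcap S]
    simp only [findFromArea3D_alt, if_pos hcap]
    rfl
  · -- the B side equals the model's live entries too
    have hnj : (if a ≠ 0 then b else 0) = b := by
      rw [ha, hb]
      cases image with
      | nil => simp [PySem.List.pyGetD_zero, PySem.List.len_eq]
      | cons x xs =>
        rw [if_pos (by simp only [PySem.List.len_eq, List.length_cons]; push_cast; omega)]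
    have hnk : (if b ≠ 0 then c else 0) = c := by
      rw [hb, hc]
      cases image with
      | nil => simp [PySem.List.pyGetD_zero, PySem.List.len_eq]
      | cons x xs =>
        cases x with
        | nil => simp [PySem.List.pyGetD_zero, PySem.List.len_eq]
        | cons y ys =>
          rw [if_pos (by simp only [PySem.List.pyGetD_zero_cons, PySem.List.len_eq,
            List.length_cons]; push_cast; omega)]
    have hB : findFromArea3D_alt image manipulated avoid nimage ps cap ks = sm.1.map Prod.fst := by
      simp only [findFromArea3D_alt, if_neg hcap]
      rw [hnj, hnk, pv_streamB manipulated avoid nimage ps ks a b c, ← hS]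
      set m := S.length with hm
      have htr0 : ∀ p, (pvBuild m).leaves.getD p none = none := by
        intro p
        rw [(pv_build_wf m).2]
        by_cases h : p < max m 1
        · rw [List.getD_replicate _ h]
        · exact List.getD_eq_default _ _ (by rw [List.length_replicate]; omega)
      have hInvB : pvInvB m (S.foldl (pvBStep cap m) (pvBuild m, [], 0)) sm := by
        refine pv_foldBM cap m S (pvBuild m, [], 0) ([], 0)
          ⟨(pv_build_wf m).1, rfl, rfl, fun p _ => htr0 p, rfl⟩ (by omega)
      obtain ⟨_, hcnt, hklen, _, halive⟩ := hInvB
      set FB := S.foldl (pvBStep cap m) (pvBuild m, [], 0) with hFB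
      show ((List.range FB.2.2).filter (fun p => (FB.1.leaves.getD p none).isSome)).map (fun p => FB.2.1.getD p (0, 0, 0)) = sm.1.map Prod.fst
      rw [show FB.2.2 = FB.2.1.length from by rw [hklen, hcnt], pv_zip_out, ← halive]
    rw [hA, hB]
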